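-- pv_equiv track=rewrite | github.com/snyke7/aoc2023 | day12.py | count_valid_single_arrangements
-- ===== SOURCE A (Python) =====
-- def count_valid_single_arrangements(mask, piece):
--     total = 0
--     for i in range(len(mask) - piece + 1):
--         if i - 1 >= 0 and mask[i - 1] == '#':  # we are not covering a place that needs to be covered
--             break
--         if i + piece < len(mask) and mask[i + piece] == '#':  # conflict
--             continue
--         tail = mask[i + piece + 1:]
--         if '#' not in tail:
--             total += 1
--     return total
-- ===== SOURCE B (Python) =====
-- def count_valid_single_arrangements(mask, piece):
--     L = len(mask)
--     first = -1  # index of first '#', -1 if none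
--     last = -1   # index of last '#', -1 if none
--     for idx, ch in enumerate(mask):
--         if ch == '#':
--             if first == -1:
--                 first = idx
--             last = idx
--     hi = min(L - piece, first) if first != -1 else L - piece
--     lo = last - piece + 1
--     if lo < 0:
--         lo = 0
--     return hi - lo + 1 if hi >= lo else 0
-- ===== Notes on version B (the rewrite author's own statement) =====
-- stated objective: faster
-- what changed: Replaces the quadratic loop (with a slice scan '# in tail' per candidate position) by one pass that records the first and last '#' index, after which the answer is a closed-form interval count.
-- outside the precondition, e.g. on count_valid_single_arrangements('#..', -2): A returns 1, B returns 0
import Mathlib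
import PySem

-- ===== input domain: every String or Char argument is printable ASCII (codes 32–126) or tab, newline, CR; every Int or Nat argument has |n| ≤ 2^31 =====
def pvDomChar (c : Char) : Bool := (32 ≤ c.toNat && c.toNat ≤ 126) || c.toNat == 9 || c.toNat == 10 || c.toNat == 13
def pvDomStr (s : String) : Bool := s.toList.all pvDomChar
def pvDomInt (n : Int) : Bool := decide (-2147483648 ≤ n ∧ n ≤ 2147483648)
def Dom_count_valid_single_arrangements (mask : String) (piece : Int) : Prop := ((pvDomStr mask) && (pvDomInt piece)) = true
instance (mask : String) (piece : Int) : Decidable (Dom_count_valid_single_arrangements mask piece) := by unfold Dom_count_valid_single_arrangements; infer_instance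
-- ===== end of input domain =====

-- B computes the answer in one pass (first/last '#' index, then a closed-form interval count)
-- instead of A's loop with a '#'-in-tail scan per candidate position.

-- ===== PORT A =====
-- the 'for i in range(...)' loop with break/continue, as structural recursion over the index list
def cvsaLoopA (cs : List Char) (piece : Int) : List Int → Int → Int
  | [], total => total
  | i :: rest, total =>
    if i - 1 ≥ 0 ∧ PySem.List.pyGet? cs (i - 1) = some '#' then total   -- break
    else if i + piece < PySem.List.len cs ∧ PySem.List.pyGet? cs (i + piece) = some '#' then
      cvsaLoopA cs piece rest total                                     -- continue
    else if PySem.Chars.isIn ['#'] (PySem.List.slice cs (some (i + piece + 1)) none) then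
      cvsaLoopA cs piece rest total
    else cvsaLoopA cs piece rest (total + 1)

def count_valid_single_arrangements (mask : String) (piece : Int) : Int :=
  cvsaLoopA mask.toList piece
    (PySem.List.pyRange 0 (PySem.Str.len mask - piece + 1) 1) 0

-- ===== PORT B =====
-- Source B's single scan: for idx, ch in enumerate(mask): record first/last '#' index
def cvsaScanB : List Char → Int → Int × Int → Int × Int
  | [], _, st => st
  | c :: rest, idx, (first, last) =>
    if c = '#' then
      cvsaScanB rest (idx + 1) (if first = -1 then idx else first, idx)
    else cvsaScanB rest (idx + 1) (first, last)

def count_valid_single_arrangements_alt (mask : String) (piece : Int) : Int :=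
  let L := PySem.Str.len mask
  let fl := cvsaScanB mask.toList 0 (-1, -1)
  let first := fl.1
  let last := fl.2
  let hi := if first ≠ -1 then min (L - piece) first else L - piece
  let lo0 := last - piece + 1
  let lo := if lo0 < 0 then 0 else lo0
  if hi ≥ lo then hi - lo + 1 else 0

-- ===== PRECONDITION & SPEC =====
-- Pre_ restricts to the natural domain of a nonnegative piece length; for negative piece A
-- either raises IndexError or returns values shaped by Python's negative-index wraparound.
def Pre_count_valid_single_arrangements (mask : String) (piece : Int) : Prop := 0 ≤ piece
instance (mask : String) (piece : Int) : Decidable (Pre_count_valid_single_arrangements mask piece) := by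
  unfold Pre_count_valid_single_arrangements; infer_instance

def pvWitness_count_valid_single_arrangements : String × Int := (".#?.", 2)

def Spec_count_valid_single_arrangements (mask : String) (piece : Int) (out : Int) : Prop := out = count_valid_single_arrangements_alt mask piece
instance (mask : String) (piece : Int) (out : Int) : Decidable (Spec_count_valid_single_arrangements mask piece out) := by unfold Spec_count_valid_single_arrangements; infer_instance

-- ===== CLAIM (what is proved, stated in full; the proofs are below) =====
def Claim_equal_count_valid_single_arrangements : Prop := ∀ (mask : String) (piece : Int), Dom_count_valid_single_arrangements mask piece → Pre_count_valid_single_arrangements mask piece → Spec_count_valid_single_arrangements mask piece (count_valid_single_arrangements mask piece)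


-- ===== LEMMAS AND PROOFS =====

-- "first is the index of the first '#' in cs, or -1 if none"
def FirstHash (cs : List Char) (first : Int) : Prop :=
  (first = -1 ∧ ∀ j : Nat, cs[j]? ≠ some '#') ∨
  (∃ k : Nat, first = (k : Int) ∧ cs[k]? = some '#' ∧ ∀ j : Nat, j < k → cs[j]? ≠ some '#')

-- "last is the index of the last '#' in cs, or -1 if none"
def LastHash (cs : List Char) (last : Int) : Prop :=
  (last = -1 ∧ ∀ j : Nat, cs[j]? ≠ some '#') ∨
  (∃ k : Nat, last = (k : Int) ∧ cs[k]? = some '#' ∧ ∀ j : Nat, k < j → cs[j]? ≠ some '#')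

-- index of the first / last '#' (proof-side reference values)
def firstIdxH : List Char → Option Nat
  | [] => none
  | c :: r => if c = '#' then some 0 else (firstIdxH r).map (· + 1)

def lastIdxH : List Char → Option Nat
  | [] => none
  | c :: r =>
    match lastIdxH r with
    | some k => some (k + 1)
    | none => if c = '#' then some 0 else none

lemma cvsaScanB_go (cs : List Char) : ∀ (idx first last : Int), 0 ≤ idx →
    cvsaScanB cs idx (first, last) =
      ((if first = -1 then (match firstIdxH cs with | some k => idx + k | none => -1) else first),
       (match lastIdxH cs with | some k => idx + (k : Int) | none => last)) := by
  induction cs with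
  | nil => intro idx first last _; simp [cvsaScanB, firstIdxH, lastIdxH]
  | cons c r ih =>
    intro idx first last hidx
    by_cases hc : c = '#'
    · rw [show cvsaScanB (c :: r) idx (first, last)
            = cvsaScanB r (idx + 1) (if first = -1 then idx else first, idx) by
          simp [cvsaScanB, hc]]
      rw [ih (idx + 1) _ _ (by omega)]
      rw [Prod.mk.injEq]
      constructor
      · by_cases hf : first = -1
        · have : ¬ (idx = -1) := by omega
          simp [firstIdxH, hc, hf, this]
        · simp [hf]
      · simp only [lastIdxH]
        cases hr : lastIdxH r with
        | some k => simp; ring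
        | none => simp [hc]
    · rw [show cvsaScanB (c :: r) idx (first, last) = cvsaScanB r (idx + 1) (first, last) by
          simp [cvsaScanB, hc]]
      rw [ih (idx + 1) _ _ (by omega)]
      rw [Prod.mk.injEq]
      constructor
      · by_cases hf : first = -1
        · simp only [hf, firstIdxH, if_neg hc]
          cases hr : firstIdxH r with
          | some k => simp; ring
          | none => simp
        · simp [hf]
      · simp only [lastIdxH, if_neg hc]
        cases hr : lastIdxH r with
        | some k => simp; ring
        | none => simp

lemma firstIdxH_spec (cs : List Char) :
    (firstIdxH cs = none ∧ ∀ j : Nat, cs[j]? ≠ some '#') ∨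
    (∃ k : Nat, firstIdxH cs = some k ∧ cs[k]? = some '#' ∧ ∀ j : Nat, j < k → cs[j]? ≠ some '#') := by
  induction cs with
  | nil => left; simp [firstIdxH]
  | cons c r ih =>
    by_cases hc : c = '#'
    · right; exact ⟨0, by simp [firstIdxH, hc], by simp [hc], by omega⟩
    · rcases ih with ⟨h1, h2⟩ | ⟨k, h1, h2, h3⟩
      · left
        refine ⟨by simp [firstIdxH, hc, h1], fun j => ?_⟩
        cases j with
        | zero => simp [hc]
        | succ m => simpa using h2 m
      · right
        refine ⟨k + 1, by simp [firstIdxH, hc, h1], by simpa using h2, fun j hj => ?_⟩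
        cases j with
        | zero => simp [hc]
        | succ m => simpa using h3 m (by omega)

lemma lastIdxH_spec (cs : List Char) :
    (lastIdxH cs = none ∧ ∀ j : Nat, cs[j]? ≠ some '#') ∨
    (∃ k : Nat, lastIdxH cs = some k ∧ cs[k]? = some '#' ∧ ∀ j : Nat, k < j → cs[j]? ≠ some '#') := by
  induction cs with
  | nil => left; simp [lastIdxH]
  | cons c r ih =>
    rcases ih with ⟨h1, h2⟩ | ⟨k, h1, h2, h3⟩
    · by_cases hc : c = '#'
      · right
        refine ⟨0, by simp [lastIdxH, h1, hc], by simp [hc], fun j hj => ?_⟩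
        cases j with
        | zero => omega
        | succ m => simpa using h2 m
      · left
        refine ⟨by simp [lastIdxH, h1, hc], fun j => ?_⟩
        cases j with
        | zero => simp [hc]
        | succ m => simpa using h2 m
    · right
      refine ⟨k + 1, by simp [lastIdxH, h1], by simpa using h2, fun j hj => ?_⟩
      cases j with
      | zero => omega
      | succ m => simpa using h3 m (by omega)

lemma cvsaScanB_spec (cs : List Char) :
    FirstHash cs (cvsaScanB cs 0 (-1, -1)).1 ∧ LastHash cs (cvsaScanB cs 0 (-1, -1)).2 := by
  rw [cvsaScanB_go cs 0 (-1) (-1) le_rfl]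
  constructor
  · rcases firstIdxH_spec cs with ⟨h1, h2⟩ | ⟨k, h1, h2, h3⟩
    · exact Or.inl ⟨by simp [h1], h2⟩
    · exact Or.inr ⟨k, by simp [h1], h2, h3⟩
  · rcases lastIdxH_spec cs with ⟨h1, h2⟩ | ⟨k, h1, h2, h3⟩
    · exact Or.inl ⟨by simp [h1], h2⟩
    · exact Or.inr ⟨k, by simp [h1], h2, h3⟩

-- '#' occurs at an index ≥ m iff m ≤ last
lemma hash_ge_iff (cs : List Char) (last : Int) (hl : LastHash cs last) (m : Int) (hm : 0 ≤ m) :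
    (∃ j : Nat, m ≤ (j : Int) ∧ cs[j]? = some '#') ↔ m ≤ last := by
  rcases hl with ⟨h1, h2⟩ | ⟨k, h1, h2, h3⟩
  · constructor
    · rintro ⟨j, _, hj⟩; exact absurd hj (h2 j)
    · intro h; omega
  · constructor
    · rintro ⟨j, hmj, hj⟩
      have : j ≤ k := by by_contra h; exact (h3 j (by omega)) hj
      omega
    · intro h; exact ⟨k, by omega, h2⟩

-- the break test, under "no '#' strictly before index i-1"
lemma brk_iff (cs : List Char) (first : Int) (hf : FirstHash cs first) (i : Int)
    (hup : first = -1 ∨ i - 1 ≤ first) :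
    (i - 1 ≥ 0 ∧ PySem.List.pyGet? cs (i - 1) = some '#') ↔ (1 ≤ i ∧ first = i - 1) := by
  constructor
  · rintro ⟨hge, hget⟩
    rw [PySem.List.pyGet?_of_nonneg cs hge] at hget
    rcases hf with ⟨h1, h2⟩ | ⟨k, h1, h2, h3⟩
    · exact absurd hget (h2 _)
    · have hk : ¬ ((i - 1).toNat < k) := fun h => (h3 _ h) hget
      rcases hup with h | h
      · omega
      · constructor
        · omega
        · omega
  · rintro ⟨h1, h2⟩
    rcases hf with ⟨hf1, _⟩ | ⟨k, hf1, hf2, _⟩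
    · omega
    · refine ⟨by omega, ?_⟩
      rw [PySem.List.pyGet?_of_nonneg cs (by omega)]
      have : (i - 1).toNat = k := by omega
      rw [this]; exact hf2

-- the conflict test together with the tail test, as one inequality on the last '#' index
lemma cond_hash_iff (cs : List Char) (last : Int) (hl : LastHash cs last) (m : Int) (hm : 0 ≤ m) :
    ((m < PySem.List.len cs ∧ PySem.List.pyGet? cs m = some '#') ∨
      PySem.Chars.isIn ['#'] (PySem.List.slice cs (some (m + 1)) none) = true) ↔ m ≤ last := by
  rw [← hash_ge_iff cs last hl m hm]
  rw [PySem.List.slice_from cs (by omega : (0:Int) ≤ m + 1)]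
  rw [PySem.Chars.isIn_iff_infix, List.singleton_infix_iff, List.mem_iff_getElem?]
  constructor
  · rintro (⟨hlt, hget⟩ | ⟨j, hj⟩)
    · rw [PySem.List.pyGet?_of_nonneg cs hm] at hget
      exact ⟨m.toNat, by omega, hget⟩
    · rw [List.getElem?_drop] at hj
      refine ⟨(m + 1).toNat + j, by omega, hj⟩
  · rintro ⟨j, hmj, hj⟩
    by_cases hje : (j : Int) = m
    · left
      have hlen : j < cs.length := (List.getElem?_eq_some_iff.mp hj).1
      refine ⟨by simp [PySem.List.len_eq]; omega, ?_⟩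
      rw [PySem.List.pyGet?_of_nonneg cs hm]
      have : m.toNat = j := by omega
      rw [this]; exact hj
    · right
      refine ⟨j - (m + 1).toNat, ?_⟩
      rw [List.getElem?_drop]
      have : (m + 1).toNat + (j - (m + 1).toNat) = j := by omega
      rw [this]; exact hj

-- the loop count, by induction on the number of remaining iterations
lemma cvsaLoopA_count (cs : List Char) (p first last : Int) (hp : 0 ≤ p)
    (hf : FirstHash cs first) (hl : LastHash cs last) :
    ∀ (n : Nat) (i total : Int), 0 ≤ i → ((cs.length : Int) - p + 1 - i).toNat = n →
      (first = -1 ∨ i - 1 ≤ first) →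
      cvsaLoopA cs p (PySem.List.pyRange i ((cs.length : Int) - p + 1) 1) total =
        total + max 0 (min ((cs.length : Int) - p) (if first = -1 then (cs.length : Int) else first)
                        - max i (max 0 (last - p + 1)) + 1) := by
  have hfr : first = -1 ∨ (0 ≤ first ∧ first < (cs.length : Int)) := by
    rcases hf with ⟨h1, _⟩ | ⟨k, h1, h2, _⟩
    · exact Or.inl h1
    · right
      have hk : k < cs.length := (List.getElem?_eq_some_iff.mp h2).1
      omega
  have hlr : last = -1 ∨ (0 ≤ last ∧ last < (cs.length : Int)) := by
    rcases hl with ⟨h1, _⟩ | ⟨k, h1, h2, _⟩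
    · exact Or.inl h1
    · right; have hk : k < cs.length := (List.getElem?_eq_some_iff.mp h2).1; omega
  intro n
  induction n with
  | zero =>
    intro i total h0 hn hup
    rw [PySem.List.pyRange_one_eq_nil (by omega)]
    have : max 0 (min ((cs.length : Int) - p) (if first = -1 then (cs.length : Int) else first)
            - max i (max 0 (last - p + 1)) + 1) = 0 := by
      rcases hfr with h | ⟨ha, hb⟩ <;> split_ifs <;> omega
    rw [this]; simp [cvsaLoopA]
  | succ n ih =>
    intro i total h0 hn hup
    have hiN : i < (cs.length : Int) - p + 1 := by omega
    rw [PySem.List.pyRange_one_cons hiN]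
    show cvsaLoopA cs p (i :: _) total = _
    rw [cvsaLoopA]
    by_cases h1 : i - 1 ≥ 0 ∧ PySem.List.pyGet? cs (i - 1) = some '#'
    · rw [if_pos h1]
      have hb := (brk_iff cs first hf i hup).mp h1
      have : max 0 (min ((cs.length : Int) - p) (if first = -1 then (cs.length : Int) else first)
              - max i (max 0 (last - p + 1)) + 1) = 0 := by
        rw [if_neg (by omega)]; omega
      rw [this]; ring
    · rw [if_neg h1]
      have hnb : ¬ (1 ≤ i ∧ first = i - 1) := fun h => h1 ((brk_iff cs first hf i hup).mpr h)
      have hup' : first = -1 ∨ (i + 1) - 1 ≤ first := by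
        rcases hup with h | h
        · exact Or.inl h
        · rcases hfr with h' | h'
          · exact Or.inl h'
          · right; omega
      have hcond := cond_hash_iff cs last hl (i + p) (by omega)
      by_cases h2 : i + p < PySem.List.len cs ∧ PySem.List.pyGet? cs (i + p) = some '#'
      · rw [if_pos h2]
        have hge : i + p ≤ last := hcond.mp (Or.inl h2)
        rw [ih (i + 1) total (by omega) (by omega) hup']
        congr 1
        omega
      · rw [if_neg h2]
        by_cases h3 : PySem.Chars.isIn ['#'] (PySem.List.slice cs (some (i + p + 1)) none) = true
        · rw [if_pos h3]
          have hge : i + p ≤ last := hcond.mp (Or.inr h3)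
          rw [ih (i + 1) total (by omega) (by omega) hup']
          congr 1
          omega
        · rw [if_neg h3]
          have hlt : ¬ (i + p ≤ last) := fun h => by
            rcases hcond.mpr h with h' | h'
            · exact h2 h'
            · exact h3 h'
          rw [ih (i + 1) (total + 1) (by omega) (by omega) hup']
          have hFi : i ≤ min ((cs.length : Int) - p)
              (if first = -1 then (cs.length : Int) else first) := by
            rcases hfr with h | ⟨ha, hb⟩ <;> split_ifs <;> omega
          omega

-- ===== VERDICT (by name: the statement is the Claim_ definition above) =====
theorem count_valid_single_arrangements_spec : Claim_equal_count_valid_single_arrangements := by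
  intro mask piece _ hpre
  have hp : 0 ≤ piece := hpre
  unfold Spec_count_valid_single_arrangements
  unfold count_valid_single_arrangements count_valid_single_arrangements_alt
  obtain ⟨hf, hl⟩ := cvsaScanB_spec mask.toList
  set first := (cvsaScanB mask.toList 0 (-1, -1)).1 with hfdef
  set last := (cvsaScanB mask.toList 0 (-1, -1)).2 with hldef
  have hL : PySem.Str.len mask = (mask.toList.length : Int) := by simp [pysem]
  rw [hL]
  rw [cvsaLoopA_count mask.toList piece first last hp hf hl
      ((mask.toList.length : Int) - piece + 1 - 0).toNat 0 0 le_rfl rfl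
      (by rcases hf with ⟨h, _⟩ | ⟨k, h, _, _⟩ <;> omega)]
  have hfr : first = -1 ∨ 0 ≤ first := by
    rcases hf with ⟨h, _⟩ | ⟨k, h, _, _⟩ <;> omega
  simp only [zero_add]
  rcases hfr with h | h <;> split_ifs <;> omega
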